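-- pv_equiv track=rewrite | github.com/carlos-escamilla33/Interview-prep | algorithms/hackerrank.py | solution
-- ===== SOURCE A (Python) =====
-- def solution(s1, s2):
--     charCount = 128 * [0]
--     for char in s1:
--         aIdx = ord(char)
--         charCount[aIdx]+=1
--
--     count = 0
--     for char in s2:
--         aIdx = ord(char)
--         val = charCount[aIdx]
--         if val > 0:
--             charCount[aIdx]-=1
--             count+=1
--     return count
-- ===== SOURCE B (Python) =====
-- def solution(s1, s2):
--     a = 128 * [0]
--     b = 128 * [0]
--     for char in s1:
--         a[ord(char)] += 1
--     for char in s2: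
--         b[ord(char)] += 1
--     return sum(min(a[i], b[i]) for i in range(128))
-- ===== Notes on version B (the rewrite author's own statement) =====
-- stated objective: alternative
-- what changed: Replaces A's destructive decrement-while-scanning-s2 pass with two independent frequency tables (one per string) and a final min-reduction over the 128 alphabet slots.
import Mathlib
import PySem

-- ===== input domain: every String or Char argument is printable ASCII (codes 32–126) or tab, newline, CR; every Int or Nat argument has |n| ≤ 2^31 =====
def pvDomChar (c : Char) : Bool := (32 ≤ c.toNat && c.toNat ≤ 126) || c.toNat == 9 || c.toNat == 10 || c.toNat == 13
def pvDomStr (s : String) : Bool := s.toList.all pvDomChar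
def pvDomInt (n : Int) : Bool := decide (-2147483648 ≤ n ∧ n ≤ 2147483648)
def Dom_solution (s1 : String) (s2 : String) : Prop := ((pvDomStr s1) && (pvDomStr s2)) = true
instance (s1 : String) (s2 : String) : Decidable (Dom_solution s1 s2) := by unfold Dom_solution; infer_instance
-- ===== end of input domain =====

-- B replaces A's destructive decrement pass over s2 by two independent frequency tables and a
-- min-reduction over the 128 slots (objective: alternative decomposition, same cost).
-- List indexing charCount[ord c] is ported with getD/set on a Nat index: exact on Dom, where
-- every character code is in [0, 128) (outside Dom Python may raise IndexError; nothing is claimed there).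

-- ===== PORT A =====
def solution (s1 : String) (s2 : String) : Int :=
  let charCount := s1.toList.foldl
    (fun t c => t.set c.toNat (t.getD c.toNat 0 + 1)) (List.replicate 128 (0 : Int))
  let st := s2.toList.foldl
    (fun (st : List Int × Int) c =>
      let v := st.1.getD c.toNat 0
      if v > 0 then (st.1.set c.toNat (v - 1), st.2 + 1) else st)
    (charCount, 0)
  st.2

-- ===== PORT B =====
def fillTable (s : String) : List Int :=
  s.toList.foldl (fun t c => t.set c.toNat (t.getD c.toNat 0 + 1)) (List.replicate 128 (0 : Int))

def solution_alt (s1 : String) (s2 : String) : Int :=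
  let a := fillTable s1
  let b := fillTable s2
  (PySem.List.pyRange 0 128 1).foldl
    (fun acc i => acc + min (a.getD i.toNat 0) (b.getD i.toNat 0)) 0

-- ===== PRECONDITION & SPEC =====
def Spec_solution (s1 : String) (s2 : String) (out : Int) : Prop := out = solution_alt s1 s2
instance (s1 : String) (s2 : String) (out : Int) : Decidable (Spec_solution s1 s2 out) := by unfold Spec_solution; infer_instance

-- ===== CLAIM (what is proved, stated in full; the proofs are below) =====
def Claim_equal_solution : Prop := ∀ (s1 : String) (s2 : String), Dom_solution s1 s2 → Spec_solution s1 s2 (solution s1 s2)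

-- ===== LEMMAS AND PROOFS =====

/-- Int-valued character count. -/
def cntC (s : List Char) (i : Nat) : Int := (s.countP (fun c => c.toNat == i) : Int)

theorem cntC_nil (i : Nat) : cntC [] i = 0 := rfl

theorem cntC_cons (c : Char) (s : List Char) (i : Nat) :
    cntC (c :: s) i = cntC s i + (if c.toNat = i then 1 else 0) := by
  unfold cntC
  rw [List.countP_cons]
  by_cases h : c.toNat = i <;> simp [h]

theorem cntC_nonneg (s : List Char) (i : Nat) : 0 ≤ cntC s i := by
  simp [cntC]

theorem fill_length (s : List Char) (t : List Int) :
    (s.foldl (fun t c => t.set c.toNat (t.getD c.toNat 0 + 1)) t).length = t.length := by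
  induction s generalizing t with
  | nil => rfl
  | cons c s ih => rw [List.foldl_cons, ih]; simp

theorem fill_getD (s : List Char) (t : List Int) (i : Nat)
    (hs : ∀ c ∈ s, c.toNat < t.length) :
    (s.foldl (fun t c => t.set c.toNat (t.getD c.toNat 0 + 1)) t).getD i 0
      = t.getD i 0 + cntC s i := by
  induction s generalizing t with
  | nil => simp [cntC_nil]
  | cons c s ih =>
    have hc : c.toNat < t.length := hs c (by simp)
    rw [List.foldl_cons, ih _ (by intro x hx; simpa using hs x (by simp [hx])), cntC_cons]
    by_cases h : c.toNat = i
    · subst h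
      simp [List.getD, List.getElem?_set_self hc]
      omega
    · simp [List.getD, List.getElem?_set_ne h, h]

/-- A's second loop computes cnt0 + Σ min(table, count of the rest). -/
theorem loop2_eq (s : List Char) (t : List Int) (cnt0 : Int)
    (hlen : t.length = 128)
    (hs : ∀ c ∈ s, c.toNat < 128)
    (hnn : ∀ i : Nat, 0 ≤ t.getD i 0) :
    (s.foldl
      (fun (st : List Int × Int) c =>
        if st.1.getD c.toNat 0 > 0 then (st.1.set c.toNat (st.1.getD c.toNat 0 - 1), st.2 + 1)
        else st)
      (t, cnt0)).2
      = cnt0 + ∑ i ∈ Finset.range 128, min (t.getD i 0) (cntC s i) := by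
  induction s generalizing t cnt0 with
  | nil =>
    simp only [List.foldl_nil, cntC_nil]
    have hz : ∀ i ∈ Finset.range 128, min (t.getD i 0) (0 : Int) = 0 :=
      fun i _ => min_eq_right (hnn i)
    rw [Finset.sum_congr rfl hz]
    simp
  | cons c s ih =>
    have hc : c.toNat < 128 := hs c (by simp)
    have hcmem : c.toNat ∈ Finset.range 128 := Finset.mem_range.mpr hc
    rw [List.foldl_cons]
    by_cases hv : t.getD c.toNat 0 > 0
    · simp only [hv, if_pos]
      rw [ih (t.set c.toNat (t.getD c.toNat 0 - 1))
            (cnt0 + 1) (by simp [hlen])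
            (by intro x hx; exact hs x (by simp [hx]))
            (by
              intro i
              have hv' : t[c.toNat]?.getD 0 > 0 := hv
              by_cases h : c.toNat = i
              · subst h
                simp only [List.getD, List.getElem?_set_self (hlen ▸ hc), Option.getD_some]
                omega
              · simpa [List.getD, List.getElem?_set_ne h] using hnn i)]
      rw [← Finset.sum_erase_add _ _ hcmem, ← Finset.sum_erase_add _ _ hcmem]
      have hrest : ∀ i ∈ (Finset.range 128).erase c.toNat,
          min ((t.set c.toNat (t.getD c.toNat 0 - 1)).getD i 0) (cntC s i)
            = min (t.getD i 0) (cntC (c :: s) i) := by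
        intro i hi
        have hne : c.toNat ≠ i := (Finset.mem_erase.mp hi).1.symm
        rw [cntC_cons]
        simp [List.getD, List.getElem?_set_ne hne, hne]
      rw [Finset.sum_congr rfl hrest]
      have hself :
          min ((t.set c.toNat (t.getD c.toNat 0 - 1)).getD c.toNat 0) (cntC s c.toNat) + 1
            = min (t.getD c.toNat 0) (cntC (c :: s) c.toNat) := by
        rw [cntC_cons]
        have hv' : t[c.toNat]?.getD 0 > 0 := hv
        have h2 := cntC_nonneg s c.toNat
        simp [List.getD, List.getElem?_set_self (hlen ▸ hc)]
        omega
      omega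
    · simp only [hv, if_false]
      rw [ih t cnt0 hlen (by intro x hx; exact hs x (by simp [hx])) hnn]
      have hz : t.getD c.toNat 0 = 0 := le_antisymm (by omega) (hnn c.toNat)
      have h2' := cntC_nonneg s c.toNat
      congr 1
      refine Finset.sum_congr rfl ?_
      intro i _
      rw [cntC_cons]
      by_cases h : c.toNat = i
      · subst h
        rw [hz]
        omega
      · simp [h]

theorem foldl_min_range (a b : List Int) (n : Nat) :
    (PySem.List.pyRange 0 (n : Int) 1).foldl
        (fun acc i => acc + min (a.getD i.toNat 0) (b.getD i.toNat 0)) 0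
      = ∑ i ∈ Finset.range n, min (a.getD i 0) (b.getD i 0) := by
  induction n with
  | zero => simp [PySem.List.pyRange_one_eq_nil]
  | succ n ih =>
    have hcast : ((n + 1 : Nat) : Int) = (n : Int) + 1 := by push_cast; ring
    rw [hcast, PySem.List.pyRange_one_succ_right (by positivity), List.foldl_append, ih,
        Finset.sum_range_succ]
    simp

theorem dom_chars (s : String) (h : pvDomStr s = true) :
    ∀ c ∈ s.toList, c.toNat < 128 := by
  intro c hc
  have := List.all_eq_true.mp h c hc
  simp [pvDomChar] at this
  omega

theorem fillTable_getD (s : String) (i : Nat) (hs : ∀ c ∈ s.toList, c.toNat < 128) :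
    (fillTable s).getD i 0 = cntC s.toList i := by
  unfold fillTable
  rw [fill_getD _ _ _ (by simpa using hs)]
  have hrep : (List.replicate 128 (0 : Int)).getD i 0 = 0 := by
    simp only [List.getD, List.getElem?_replicate]
    split <;> rfl
  rw [hrep, zero_add]

theorem fillTable_nonneg (s : String) (hs : ∀ c ∈ s.toList, c.toNat < 128) (i : Nat) :
    0 ≤ (fillTable s).getD i 0 := by
  rw [fillTable_getD s i hs]; exact cntC_nonneg _ _

theorem solution_alt_eq_sum (s1 s2 : String)
    (h1 : ∀ c ∈ s1.toList, c.toNat < 128) (h2 : ∀ c ∈ s2.toList, c.toNat < 128) :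
    solution_alt s1 s2
      = ∑ i ∈ Finset.range 128, min (cntC s1.toList i) (cntC s2.toList i) := by
  unfold solution_alt
  have h128 : ((128 : Nat) : Int) = 128 := by norm_num
  rw [← h128, foldl_min_range]
  refine Finset.sum_congr rfl fun i _ => ?_
  rw [fillTable_getD _ _ h1, fillTable_getD _ _ h2]

-- ===== VERDICT (by name: the statement is the Claim_ definition above) =====
theorem solution_spec : Claim_equal_solution := by
  intro s1 s2 hdom
  have hb := Bool.and_eq_true_iff.mp hdom
  have h1 := dom_chars s1 hb.1
  have h2 := dom_chars s2 hb.2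
  show (s2.toList.foldl
      (fun (st : List Int × Int) c =>
        if st.1.getD c.toNat 0 > 0 then (st.1.set c.toNat (st.1.getD c.toNat 0 - 1), st.2 + 1)
        else st)
      (fillTable s1, 0)).2
      = solution_alt s1 s2
  rw [loop2_eq s2.toList _ 0 (by unfold fillTable; rw [fill_length]; simp) h2
        (fun i => fillTable_nonneg s1 h1 i),
      solution_alt_eq_sum s1 s2 h1 h2, zero_add]
  refine Finset.sum_congr rfl fun i _ => ?_
  rw [fillTable_getD s1 i h1]
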